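-- pv_equiv track=rewrite | github.com/DA-testa/parallel-processing-blxtre | main.py | parallel_processing
-- ===== SOURCE A (Python) =====
-- def parallel_processing(n, m, data):
--     output = []
--     threads = [(i, 0) for i in range(n)]  # list of threads, each thread is represented by a tuple (index, time)
--     for i in range(m):
--         t = data[i]
--         thread = min(threads, key=lambda x: x[1])  # find the thread that will finish its job the earliest
--         output.append((thread[0], thread[1]))  # add the output pair
--         threads.remove(thread)  # remove the thread from the list
--         threads.append((thread[0], thread[1] + t))  # add the thread back with the updated time
--     return output
-- ===== SOURCE B (Python) =====
-- def parallel_processing(n, m, data):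
--     # Priority queue kept as a list sorted ascending by the tuple (finish_time, seq):
--     # pop the head in O(1), insert by hand-rolled binary search + slice assignment.
--     # `seq` numbers (re)insertions, replicating A's list-order tie-break exactly.
--     output = []
--     queue = [(0, i, i) for i in range(n)]  # (time, seq, index), already sorted
--     seq = n
--     for i in range(m):
--         t = data[i]
--         time, _, idx = queue[0]
--         output.append((idx, time))
--         entry = (time + t, seq, idx)
--         lo, hi = 1, len(queue)
--         while lo < hi:
--             mid = (lo + hi) // 2
--             if queue[mid] < entry:
--                 lo = mid + 1
--             else:
--                 hi = mid
--         queue[lo:lo] = [entry]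
--         del queue[0]
--         seq += 1
--     return output
-- ===== Notes on version B (the rewrite author's own statement) =====
-- stated objective: faster
-- what changed: A rescans the whole thread list with min(key=...) and list.remove each job; B keeps the threads as a list sorted by (finish_time, insertion_seq), pops the head in O(1) and reinserts by hand-rolled binary search + slice assignment, the seq counter replicating A's list-order tie-break.
import Mathlib
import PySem

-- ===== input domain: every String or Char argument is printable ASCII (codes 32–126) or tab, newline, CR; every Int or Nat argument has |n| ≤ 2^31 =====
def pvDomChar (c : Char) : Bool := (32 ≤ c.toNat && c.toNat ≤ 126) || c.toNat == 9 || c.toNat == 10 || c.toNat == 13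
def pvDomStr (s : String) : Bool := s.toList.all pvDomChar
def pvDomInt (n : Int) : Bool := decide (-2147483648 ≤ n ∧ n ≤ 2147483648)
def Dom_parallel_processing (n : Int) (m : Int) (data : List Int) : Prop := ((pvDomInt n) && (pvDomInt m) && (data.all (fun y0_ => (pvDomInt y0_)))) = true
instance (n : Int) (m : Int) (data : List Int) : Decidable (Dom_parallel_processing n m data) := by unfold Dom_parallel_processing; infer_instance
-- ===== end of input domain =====

-- B replaces A's per-job linear min-scan + remove with a (time, seq)-sorted queue popped at the
-- head and refilled by binary-search insertion; measured faster at large sizes.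


-- ===== PORT A =====
-- loop body of A's 'for i in range(m)' (kept as a named helper for the proofs)
def ppAStep (data : List Int) (st : List (Int × Int) × List (Int × Int)) (i : Int) :
    List (Int × Int) × List (Int × Int) :=
  let t := PySem.List.pyGetD data i 0                    -- data[i]; IndexError excluded by Pre_
  match PySem.List.min? st.2 (fun x => x.2) with         -- min(threads, key=lambda x: x[1])
  | none => st                                           -- min([]) raises ValueError: excluded by Pre_
  | some thread =>
    (st.1 ++ [(thread.1, thread.2)],
     ((PySem.List.remove? st.2 thread).getD st.2) ++ [(thread.1, thread.2 + t)])

def parallel_processing (n : Int) (m : Int) (data : List Int) : List (Int × Int) :=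
  ((PySem.List.pyRange 0 m 1).foldl (ppAStep data)
    ([], (PySem.List.pyRange 0 n 1).map (fun i => (i, (0 : Int))))).1

-- ===== PORT B =====
-- Python's '<' on int triples (lexicographic)
def ppLt (a b : Int × Int × Int) : Bool :=
  a.1 < b.1 || (a.1 == b.1 && (a.2.1 < b.2.1 || (a.2.1 == b.2.1 && a.2.2 < b.2.2)))

-- the hand-rolled 'while lo < hi' binary search of Source B, step for step
def ppBSearch (queue : List (Int × Int × Int)) (entry : Int × Int × Int) (lo hi : Int) : Int :=
  if h : lo < hi then
    let mid := PySem.Int.floordiv (lo + hi) 2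
    if ppLt (PySem.List.pyGetD queue mid (0, 0, 0)) entry then
      ppBSearch queue entry (mid + 1) hi
    else
      ppBSearch queue entry lo mid
  else lo
termination_by (hi - lo).toNat
decreasing_by
  · have h1 := (PySem.Int.floordiv_two_mid_bounds (le_of_lt h)).1
    omega
  · have h2 : PySem.Int.floordiv (lo + hi) 2 < hi :=
      (PySem.Int.floordiv_lt_iff_lt_mul (by norm_num)).2 (by omega)
    omega

-- loop body of B's 'for i in range(m)'
def ppBStep (data : List Int) (st : List (Int × Int) × List (Int × Int × Int) × Int) (i : Int) :
    List (Int × Int) × List (Int × Int × Int) × Int :=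
  let t := PySem.List.pyGetD data i 0                          -- data[i]; IndexError excluded by Pre_
  let hd := PySem.List.pyGetD st.2.1 0 ((0 : Int), (0 : Int), (0 : Int))  -- queue[0]; IndexError excluded by Pre_
  let entry := (hd.1 + t, st.2.2, hd.2.2)
  let lo := ppBSearch st.2.1 entry 1 (PySem.List.len st.2.1)
  (st.1 ++ [(hd.2.2, hd.1)],                                   -- output.append((idx, time))
   (st.2.1.insertIdx lo.toNat entry).tail,                     -- queue[lo:lo] = [entry]; del queue[0]
   st.2.2 + 1)                                                 -- seq += 1

def parallel_processing_alt (n : Int) (m : Int) (data : List Int) : List (Int × Int) :=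
  ((PySem.List.pyRange 0 m 1).foldl (ppBStep data)
    ([], (PySem.List.pyRange 0 n 1).map (fun i => ((0 : Int), i, i)), n)).1

-- ===== PRECONDITION & SPEC =====
-- A raises IndexError when m > len(data) and ValueError (min of empty) when m > 0 but n < 1;
-- Pre_ excludes exactly those inputs.
def Pre_parallel_processing (n : Int) (m : Int) (data : List Int) : Prop :=
  0 < m → (1 ≤ n ∧ m ≤ (data.length : Int))
instance (n : Int) (m : Int) (data : List Int) : Decidable (Pre_parallel_processing n m data) := by
  unfold Pre_parallel_processing; infer_instance

def pvWitness_parallel_processing : Int × Int × List Int := (2, 3, [1, 2, 3])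

def Spec_parallel_processing (n : Int) (m : Int) (data : List Int) (out : List (Int × Int)) : Prop := out = parallel_processing_alt n m data
instance (n : Int) (m : Int) (data : List Int) (out : List (Int × Int)) : Decidable (Spec_parallel_processing n m data out) := by unfold Spec_parallel_processing; infer_instance

-- ===== CLAIM (what is proved, stated in full; the proofs are below) =====
def Claim_equal_parallel_processing : Prop := ∀ (n : Int) (m : Int) (data : List Int), Dom_parallel_processing n m data → Pre_parallel_processing n m data → Spec_parallel_processing n m data (parallel_processing n m data)

-- ===== LEMMAS AND PROOFS =====

-- the view sending a B-queue element (time, seq, idx) to A's thread tuple (idx, time)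
def ppF (e : Int × Int × Int) : Int × Int := (e.2.2, e.1)

def ppPlt (a b : Int × Int × Int) : Prop := ppLt a b = true

-- ordered insertion: the functional shape B's binary-search insert is reduced to
def ppLinsert (e : Int × Int × Int) : List (Int × Int × Int) → List (Int × Int × Int)
  | [] => [e]
  | x :: xs => if ppLt x e then x :: ppLinsert e xs else e :: x :: xs

-- coupling invariant: aug is A's thread list enriched with seq stamps (in A's list order);
-- queue is its (time, seq)-sorted rearrangement; seq is B's counter
def ppInv (aug queue : List (Int × Int × Int)) (seq : Int) : Prop :=
  aug.Pairwise (fun a b => a.2.1 < b.2.1) ∧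
  (∀ e ∈ aug, e.2.1 < seq) ∧
  (aug.map (fun e => e.2.2)).Nodup ∧
  queue.Perm aug ∧
  queue.Pairwise ppPlt

lemma ppLt_iff (a b : Int × Int × Int) :
    ppLt a b = true ↔
      (a.1 < b.1 ∨ (a.1 = b.1 ∧ (a.2.1 < b.2.1 ∨ (a.2.1 = b.2.1 ∧ a.2.2 < b.2.2)))) := by
  simp [ppLt]

lemma ppLt_trans {a b c : Int × Int × Int} (h1 : ppPlt a b) (h2 : ppPlt b c) : ppPlt a c := by
  unfold ppPlt at *
  rw [ppLt_iff] at *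
  omega

lemma ppLt_total_of_ne_seq {a b : Int × Int × Int} (h : a.2.1 ≠ b.2.1) :
    ppLt a b = true ∨ ppLt b a = true := by
  rw [ppLt_iff, ppLt_iff]; omega

lemma min?_cons_cons (a x : Int × Int) (xs : List (Int × Int)) :
    PySem.List.min? (a :: x :: xs) (fun y => y.2)
      = PySem.List.min? ((if x.2 < a.2 then x else a) :: xs) (fun y => y.2) := by
  by_cases h : x.2 < a.2 <;> simp [PySem.List.min?, h]

lemma min?_keep (post : List (Int × Int)) (m : Int × Int) (h : ∀ y ∈ post, m.2 ≤ y.2) :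
    PySem.List.min? (m :: post) (fun y => y.2) = some m := by
  induction post with
  | nil => simp [PySem.List.min?]
  | cons x xs ih =>
    rw [min?_cons_cons]
    have hx : ¬ x.2 < m.2 := not_lt.2 (h x (by simp))
    rw [if_neg hx]
    exact ih (fun y hy => h y (by simp [hy]))

lemma min?_chain (post : List (Int × Int)) (m : Int × Int) (h2 : ∀ y ∈ post, m.2 ≤ y.2) :
    ∀ (pre : List (Int × Int)) (a : Int × Int), m.2 < a.2 → (∀ y ∈ pre, m.2 < y.2) →
      PySem.List.min? (a :: (pre ++ m :: post)) (fun y => y.2) = some m := by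
  intro pre
  induction pre with
  | nil =>
    intro a ha _
    rw [List.nil_append, min?_cons_cons, if_pos ha]
    exact min?_keep post m h2
  | cons p ps ih =>
    intro a ha hpre
    rw [List.cons_append, min?_cons_cons]
    by_cases h : p.2 < a.2
    · rw [if_pos h]
      exact ih p (hpre p (by simp)) (fun y hy => hpre y (by simp [hy]))
    · rw [if_neg h]
      exact ih a ha (fun y hy => hpre y (by simp [hy]))

-- Python's min with a key returns the FIRST element attaining the minimum
lemma min?_first (pre : List (Int × Int)) (m : Int × Int) (post : List (Int × Int))
    (h1 : ∀ y ∈ pre, m.2 < y.2) (h2 : ∀ y ∈ post, m.2 ≤ y.2) :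
    PySem.List.min? (pre ++ m :: post) (fun x => x.2) = some m := by
  cases pre with
  | nil => exact min?_keep post m h2
  | cons p ps =>
    rw [List.cons_append]
    exact min?_chain post m h2 ps p (h1 p (by simp)) (fun y hy => h1 y (by simp [hy]))

lemma mem_ppLinsert {y e : Int × Int × Int} {l : List (Int × Int × Int)} :
    y ∈ ppLinsert e l ↔ y = e ∨ y ∈ l := by
  induction l with
  | nil => simp [ppLinsert]
  | cons x xs ih =>
    by_cases hx : ppLt x e
    · simp [ppLinsert, hx, ih]; tauto
    · simp [ppLinsert, hx]

lemma ppLinsert_perm (e : Int × Int × Int) (l : List (Int × Int × Int)) :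
    (ppLinsert e l).Perm (e :: l) := by
  induction l with
  | nil => simp [ppLinsert]
  | cons x xs ih =>
    by_cases hx : ppLt x e
    · simp only [ppLinsert, hx, if_true]
      exact (ih.cons x).trans (List.Perm.swap e x xs)
    · simp [ppLinsert, hx]

lemma ppLinsert_pairwise {e : Int × Int × Int} {l : List (Int × Int × Int)}
    (hp : l.Pairwise ppPlt) (ht : ∀ x ∈ l, ppLt x e = true ∨ ppLt e x = true) :
    (ppLinsert e l).Pairwise ppPlt := by
  induction l with
  | nil => simp [ppLinsert]
  | cons x xs ih =>
    rw [List.pairwise_cons] at hp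
    by_cases hx : ppLt x e
    · simp only [ppLinsert, hx, if_true]
      rw [List.pairwise_cons]
      refine ⟨?_, ih hp.2 (fun y hy => ht y (by simp [hy]))⟩
      intro y hy
      rcases mem_ppLinsert.1 hy with h | h
      · exact h ▸ hx
      · exact hp.1 y h
    · have hex : ppLt e x = true := by
        rcases ht x (by simp) with h | h
        · exact absurd h hx
        · exact h
      simp only [ppLinsert, hx]
      rw [if_neg (by simp), List.pairwise_cons]
      refine ⟨?_, List.pairwise_cons.2 hp⟩
      intro y hy
      rcases List.mem_cons.1 hy with h | h
      · exact h ▸ hex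
      · exact ppLt_trans hex (hp.1 y h)

lemma ppLinsert_eq_insertIdx (e : Int × Int × Int) (l : List (Int × Int × Int)) :
    ppLinsert e l = l.insertIdx (l.takeWhile (fun x => ppLt x e)).length e := by
  induction l with
  | nil => rfl
  | cons x xs ih =>
    by_cases hx : ppLt x e
    · simp [ppLinsert, hx, ih]
    · simp [ppLinsert, hx]

-- the binary search of port B lands exactly at the ordered-insertion point
lemma ppBSearch_run (qh : Int × Int × Int) (qt : List (Int × Int × Int)) (entry : Int × Int × Int)
    (hsorted : qt.Pairwise ppPlt) :
    ∀ lo hi : Int, 1 ≤ lo →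
      lo ≤ 1 + ((qt.takeWhile (fun x => ppLt x entry)).length : Int) →
      1 + ((qt.takeWhile (fun x => ppLt x entry)).length : Int) ≤ hi →
      hi ≤ PySem.List.len (qh :: qt) →
      ppBSearch (qh :: qt) entry lo hi = 1 + ((qt.takeWhile (fun x => ppLt x entry)).length : Int) := by
  have hF2' : ∀ x ∈ qt.dropWhile (fun x => ppLt x entry), ppLt x entry = false := by
    have hpw : (qt.dropWhile (fun x => ppLt x entry)).Pairwise ppPlt :=
      hsorted.sublist (List.dropWhile_sublist _)
    cases hdw : qt.dropWhile (fun x => ppLt x entry) with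
    | nil => simp
    | cons d ds =>
      have hd : ppLt d entry = false := by
        have hh := List.head?_dropWhile_not (fun x => ppLt x entry) qt
        rw [hdw] at hh; simpa using hh
      intro x hx
      rcases List.mem_cons.1 hx with rfl | hx
      · exact hd
      · rw [hdw] at hpw
        have hdx : ppPlt d x := (List.pairwise_cons.1 hpw).1 x hx
        by_contra hnot
        have hxe : ppPlt x entry := by simpa [ppPlt] using hnot
        have : ppPlt d entry := ppLt_trans hdx hxe
        simp [ppPlt, hd] at this
  have htwle : (qt.takeWhile (fun x => ppLt x entry)).length ≤ qt.length :=
    (List.takeWhile_prefix _).length_le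
  have hsplitq : qt.takeWhile (fun x => ppLt x entry) ++ qt.dropWhile (fun x => ppLt x entry) = qt :=
    List.takeWhile_append_dropWhile
  have hlen2 : (qt.takeWhile (fun x => ppLt x entry)).length
      + (qt.dropWhile (fun x => ppLt x entry)).length = qt.length := by
    rw [← List.length_append, hsplitq]
  have hF1 : ∀ (k : Nat) (hk : k < qt.length),
      k < (qt.takeWhile (fun x => ppLt x entry)).length → ppLt (qt[k]) entry = true := by
    intro k hk hklt
    have hpre := List.takeWhile_prefix (l := qt) (fun x => ppLt x entry)
    have heq : (qt.takeWhile (fun x => ppLt x entry))[k]'(hklt) = qt[k] := hpre.getElem hklt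
    rw [← heq]
    have := List.mem_takeWhile_imp (p := fun x => ppLt x entry) (List.getElem_mem hklt)
    simpa using this
  have hF2 : ∀ (k : Nat) (hk : k < qt.length),
      (qt.takeWhile (fun x => ppLt x entry)).length ≤ k → ppLt (qt[k]) entry = false := by
    intro k hk hge
    have hmem : qt[k] ∈ qt.dropWhile (fun x => ppLt x entry) := by
      have heqq : qt[k] = (qt.takeWhile (fun x => ppLt x entry)
          ++ qt.dropWhile (fun x => ppLt x entry))[k]'(by rw [hsplitq]; exact hk) :=
        List.getElem_of_eq hsplitq.symm hk
      rw [heqq, List.getElem_append_right hge]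
      exact List.getElem_mem (by omega)
    exact hF2' _ hmem
  suffices H : ∀ (fuel : Nat) (lo hi : Int), (hi - lo).toNat ≤ fuel → 1 ≤ lo →
      lo ≤ 1 + ((qt.takeWhile (fun x => ppLt x entry)).length : Int) →
      1 + ((qt.takeWhile (fun x => ppLt x entry)).length : Int) ≤ hi →
      hi ≤ PySem.List.len (qh :: qt) →
      ppBSearch (qh :: qt) entry lo hi = 1 + ((qt.takeWhile (fun x => ppLt x entry)).length : Int) by
    intro lo hi h1 h2 h3 h4
    exact H (hi - lo).toNat lo hi le_rfl h1 h2 h3 h4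
  intro fuel
  induction fuel with
  | zero =>
    intro lo hi hf h1 h2 h3 h4
    rw [ppBSearch, dif_neg (by omega)]
    omega
  | succ f ih =>
    intro lo hi hf h1 h2 h3 h4
    have hlenq : PySem.List.len (qh :: qt) = (qt.length : Int) + 1 := by
      rw [PySem.List.len_eq, List.length_cons]; push_cast; ring
    by_cases hlt : lo < hi
    · have hmid1 := (PySem.Int.floordiv_two_mid_bounds (le_of_lt hlt)).1
      have hmid2 : PySem.Int.floordiv (lo + hi) 2 < hi :=
        (PySem.Int.floordiv_lt_iff_lt_mul (by norm_num)).2 (by omega)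
      rw [ppBSearch, dif_pos hlt]
      set mid := PySem.Int.floordiv (lo + hi) 2 with hmiddef
      have hkk : mid.toNat - 1 < qt.length := by omega
      have hget : PySem.List.pyGetD (qh :: qt) mid ((0:Int), (0:Int), (0:Int))
          = qt[mid.toNat - 1]'hkk := by
        rw [PySem.List.pyGetD_eq_getElem _ _ (by omega) (by rw [List.length_cons]; push_cast; omega)]
        rw [List.getElem_cons, dif_neg (by omega)]
      by_cases hP : ppLt (PySem.List.pyGetD (qh :: qt) mid ((0:Int), (0:Int), (0:Int))) entry
      · rw [if_pos hP]
        have hmlt : mid < 1 + ((qt.takeWhile (fun x => ppLt x entry)).length : Int) := by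
          by_contra hge
          have hf2 := hF2 (mid.toNat - 1) hkk (by omega)
          rw [hget] at hP
          simp [hf2] at hP
        exact ih (mid + 1) hi (by omega) (by omega) (by omega) h3 h4
      · rw [if_neg hP]
        have hmge : 1 + ((qt.takeWhile (fun x => ppLt x entry)).length : Int) ≤ mid := by
          by_contra hge
          have hf1 := hF1 (mid.toNat - 1) hkk (by omega)
          rw [hget] at hP
          exact hP hf1
        exact ih lo mid (by omega) h1 h2 hmge (by omega)
    · rw [ppBSearch, dif_neg hlt]
      omega

lemma ppBSearch_insert (qh : Int × Int × Int) (qt : List (Int × Int × Int))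
    (entry : Int × Int × Int)
    (hsorted : qt.Pairwise ppPlt) :
    (List.insertIdx (qh :: qt)
        (ppBSearch (qh :: qt) entry 1 (PySem.List.len (qh :: qt))).toNat entry).tail
      = ppLinsert entry qt := by
  have htwle : (qt.takeWhile (fun x => ppLt x entry)).length ≤ qt.length :=
    (List.takeWhile_prefix _).length_le
  have hlenq : PySem.List.len (qh :: qt) = (qt.length : Int) + 1 := by
    rw [PySem.List.len_eq, List.length_cons]; push_cast; ring
  rw [ppBSearch_run qh qt entry hsorted 1 (PySem.List.len (qh :: qt))
      (by omega) (by omega) (by omega) (by omega)]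
  have hnat : (1 + ((qt.takeWhile (fun x => ppLt x entry)).length : Int)).toNat
      = (qt.takeWhile (fun x => ppLt x entry)).length + 1 := by omega
  rw [hnat, List.insertIdx_succ_cons, List.tail_cons, ppLinsert_eq_insertIdx]

-- one coupled loop: the fold of A's body over any index list equals the fold of B's body
lemma ppLoop (data : List Int) (r : List Int) :
    ∀ (out : List (Int × Int)) (aug queue : List (Int × Int × Int)) (seq : Int),
      ppInv aug queue seq → aug ≠ [] →
      (r.foldl (ppAStep data) (out, aug.map ppF)).1
        = (r.foldl (ppBStep data) (out, queue, seq)).1 := by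
  induction r with
  | nil => intro out aug queue seq _ _; rfl
  | cons i r ih =>
    intro out aug queue seq hinv hne
    obtain ⟨hpwseq, hbound, hnodup, hperm, hpwq⟩ := hinv
    cases hq : queue with
    | nil =>
      rw [hq] at hperm
      exact absurd (hperm.symm.eq_nil) hne
    | cons qhd qtl =>
    rw [hq] at hperm hpwq
    have hqh_mem_aug : qhd ∈ aug := hperm.subset (by simp)
    obtain ⟨pre, post, haug⟩ := List.append_of_mem hqh_mem_aug
    rw [haug] at hpwseq hbound hnodup hperm ⊢
    have hpw_split := List.pairwise_append.1 hpwseq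
    have hseq_pre : ∀ y ∈ pre, y.2.1 < qhd.2.1 := fun y hy => hpw_split.2.2 y hy qhd (by simp)
    have hqt_gt : ∀ x ∈ qtl, ppPlt qhd x := (List.pairwise_cons.1 hpwq).1
    have hpwqtl : qtl.Pairwise ppPlt := (List.pairwise_cons.1 hpwq).2
    have hqtl_perm : qtl.Perm (pre ++ post) :=
      (hperm.trans List.perm_middle).cons_inv
    have hmem_qtl : ∀ y, y ∈ pre ++ post → y ∈ qtl := fun y hy => hqtl_perm.symm.subset hy
    have htime_pre : ∀ y ∈ pre, qhd.1 < y.1 := by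
      intro y hy
      have hpp : ppPlt qhd y := hqt_gt y (hmem_qtl y (by simp [hy]))
      have hs := hseq_pre y hy
      rw [ppPlt, ppLt_iff] at hpp; omega
    have htime_post : ∀ y ∈ post, qhd.1 ≤ y.1 := by
      intro y hy
      have hpp := hqt_gt y (hmem_qtl y (by simp [hy]))
      rw [ppPlt, ppLt_iff] at hpp; omega
    have hmin : PySem.List.min? ((pre ++ qhd :: post).map ppF) (fun x => x.2) = some (ppF qhd) := by
      rw [List.map_append, List.map_cons]
      apply min?_first
      · intro y hy
        obtain ⟨z, hz, rfl⟩ := List.mem_map.1 hy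
        exact htime_pre z hz
      · intro y hy
        obtain ⟨z, hz, rfl⟩ := List.mem_map.1 hy
        exact htime_post z hz
    have hFqh_mem : ppF qhd ∈ (pre ++ qhd :: post).map ppF := List.mem_map_of_mem (by simp)
    have hFnotpre : ppF qhd ∉ pre.map ppF := by
      intro hmem
      obtain ⟨z, hz, hzeq⟩ := List.mem_map.1 hmem
      have h1 := htime_pre z hz
      have h2 : z.1 = qhd.1 := congrArg Prod.snd hzeq
      omega
    have hrem : PySem.List.remove? ((pre ++ qhd :: post).map ppF) (ppF qhd)
        = some (pre.map ppF ++ post.map ppF) := by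
      rw [PySem.List.remove?_eq_some_erase _ _ hFqh_mem, List.map_append, List.map_cons,
        List.erase_append_right _ hFnotpre, List.erase_cons_head]
    have hstepA : ppAStep data (out, (pre ++ qhd :: post).map ppF) i
        = (out ++ [(qhd.2.2, qhd.1)],
           ((pre ++ post) ++ [(qhd.1 + PySem.List.pyGetD data i 0, seq, qhd.2.2)]).map ppF) := by
      simp only [ppAStep, hmin, hrem, Option.getD_some]
      simp [ppF]
    have hstepB : ppBStep data (out, qhd :: qtl, seq) i
        = (out ++ [(qhd.2.2, qhd.1)],
           ppLinsert (qhd.1 + PySem.List.pyGetD data i 0, seq, qhd.2.2) qtl, seq + 1) := by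
      simp only [ppBStep, PySem.List.pyGetD_zero_cons]
      rw [ppBSearch_insert qhd qtl _ hpwqtl]
    have htot : ∀ x ∈ qtl,
        ppLt x (qhd.1 + PySem.List.pyGetD data i 0, seq, qhd.2.2) = true ∨
        ppLt (qhd.1 + PySem.List.pyGetD data i 0, seq, qhd.2.2) x = true := by
      intro x hx
      have hxa : x ∈ pre ++ qhd :: post := by
        have := hqtl_perm.subset hx
        simp only [List.mem_append] at this ⊢
        rcases this with h | h
        · exact Or.inl h
        · exact Or.inr (List.mem_cons_of_mem _ h)
      have := hbound x hxa
      exact ppLt_total_of_ne_seq (by simp; omega)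
    rw [List.foldl_cons, List.foldl_cons, hstepA, hstepB]
    apply ih
    · refine ⟨?_, ?_, ?_, ?_, ?_⟩
      · rw [List.pairwise_append]
        refine ⟨?_, by simp, ?_⟩
        · exact hpwseq.sublist (List.Sublist.append (List.Sublist.refl pre)
            (List.sublist_cons_self qhd post))
        · intro a ha b hb
          simp only [List.mem_singleton] at hb
          subst hb
          have haa : a ∈ pre ++ qhd :: post := by
            simp only [List.mem_append] at ha ⊢
            rcases ha with h | h
            · exact Or.inl h
            · exact Or.inr (List.mem_cons_of_mem _ h)
          have := hbound a haa
          simpa using this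
      · intro e he
        simp only [List.mem_append, List.mem_singleton] at he
        rcases he with (h | h) | h
        · have := hbound e (by simp [h]); omega
        · have := hbound e (by simp [List.mem_cons_of_mem _ h]); omega
        · subst h; simp
      · have hpermidx : (((pre ++ post) ++ [(qhd.1 + PySem.List.pyGetD data i 0, seq, qhd.2.2)]).map
            (fun e => e.2.2)).Perm ((pre ++ qhd :: post).map (fun e => e.2.2)) := by
          simp only [List.map_append, List.map_cons, List.map_nil]
          exact (List.perm_append_singleton _ _).trans List.perm_middle.symm
        exact hpermidx.nodup_iff.2 hnodup
      · exact (ppLinsert_perm _ _).trans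
          ((hqtl_perm.cons _).trans (List.perm_append_singleton _ _).symm)
      · exact ppLinsert_pairwise hpwqtl htot
    · simp

-- ===== VERDICT (by name: the statement is the Claim_ definition above) =====
theorem parallel_processing_spec : Claim_equal_parallel_processing := by
  unfold Claim_equal_parallel_processing
  intro n m data _ hpre
  unfold Spec_parallel_processing parallel_processing parallel_processing_alt
  by_cases hm : 0 < m
  · obtain ⟨hn, -⟩ := hpre hm
    have hmap : (PySem.List.pyRange 0 n 1).map (fun i => (i, (0 : Int)))
        = ((PySem.List.pyRange 0 n 1).map (fun i => ((0 : Int), i, i))).map ppF := by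
      rw [List.map_map]; rfl
    rw [hmap]
    apply ppLoop
    · refine ⟨?_, ?_, ?_, List.Perm.refl _, ?_⟩
      · exact List.Pairwise.map _ (fun a b h => h) (PySem.List.pairwise_lt_pyRange_one 0 n)
      · intro e he
        obtain ⟨j, hj, rfl⟩ := List.mem_map.1 he
        exact (PySem.List.mem_pyRange_one.1 hj).2
      · simp only [List.map_map]
        simpa [Function.comp_def] using PySem.List.nodup_pyRange_one 0 n
      · exact List.Pairwise.map _
          (fun a b h => by rw [ppPlt, ppLt_iff]; simp; omega)
          (PySem.List.pairwise_lt_pyRange_one 0 n)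
    · intro hnil
      have := congrArg List.length hnil
      simp [PySem.List.length_pyRange_one] at this
      omega
  · rw [PySem.List.pyRange_one_eq_nil (a := 0) (b := m) (by omega)]
    rfl
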